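-- pv_equiv track=rewrite | github.com/langgenius/dify | api/core/rag/extractor/pdf/openparse/tables/unitable/utils.py | build_table_from_html_and_cell
-- ===== SOURCE A (Python) =====
-- from typing import Optional
--
-- def build_table_from_html_and_cell(
--         structure: list[str], content: Optional[list[str]] = None
-- ) -> list[str]:
--     assert structure is not None
--     html_code = list()
--
--     if content is None:
--         content_copy = ["placeholder"] * len(structure)
--     else:
--         content_copy = content.copy()
--
--     for tag in structure:
--         if tag in ("<td>[]</td>", ">[]</td>"):
--             if len(content_copy) == 0:
--                 continue
--             cell = content_copy.pop(0)
--             html_code.append(tag.replace("[]", cell))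
--         else:
--             html_code.append(tag)
--
--     return html_code
-- ===== SOURCE B (Python) =====
-- from typing import Optional
--
-- CELL_TAGS = ("<td>[]</td>", ">[]</td>")
--
-- def build_table_from_html_and_cell(
--         structure: list[str], content: Optional[list[str]] = None
-- ) -> list[str]:
--     assert structure is not None
--     if content is None:
--         content_copy = ["placeholder"] * len(structure)
--     else:
--         content_copy = content.copy()
--     # index pass: positions of cell tags; the first len(content_copy) of them get filled
--     positions = [i for i, tag in enumerate(structure) if tag in CELL_TAGS]
--     filled = dict(zip(positions, content_copy))
--     html_code = []
--     for i, tag in enumerate(structure):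
--         if tag in CELL_TAGS:
--             if i in filled:
--                 html_code.append(tag.replace("[]", filled[i]))
--         else:
--             html_code.append(tag)
--     return html_code
-- ===== Notes on version B (the rewrite author's own statement) =====
-- stated objective: alternative
-- what changed: Replaces A's destructive scan that pops content from the front with a continue guard by a two-phase shape: an index pass collects cell-tag positions, a dict maps the first positions to their content, and one fill pass emits fill/skip/plain per tag via dict lookup.
import Mathlib
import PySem

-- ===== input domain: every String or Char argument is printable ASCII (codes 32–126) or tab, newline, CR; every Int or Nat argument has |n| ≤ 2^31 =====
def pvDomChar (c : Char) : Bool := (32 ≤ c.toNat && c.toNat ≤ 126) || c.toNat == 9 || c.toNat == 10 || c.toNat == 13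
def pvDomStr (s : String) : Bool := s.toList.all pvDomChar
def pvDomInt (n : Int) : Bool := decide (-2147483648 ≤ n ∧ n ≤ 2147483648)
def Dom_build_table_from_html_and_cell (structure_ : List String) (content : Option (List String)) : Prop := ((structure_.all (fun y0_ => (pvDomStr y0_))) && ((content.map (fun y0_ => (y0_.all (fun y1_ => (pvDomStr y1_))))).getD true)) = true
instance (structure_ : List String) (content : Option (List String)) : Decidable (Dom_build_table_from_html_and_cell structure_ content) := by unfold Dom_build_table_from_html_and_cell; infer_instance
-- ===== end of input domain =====

-- B replaces A's destructive front-pop scan of the content list by an index pass that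
-- tabulates which cell positions get which content, then a single fill pass (objective: alternative decomposition, same cost).

-- the membership test `tag in ("<td>[]</td>", ">[]</td>")` shared by both Pythons
def pvCell (t : String) : Bool := t == "<td>[]</td>" || t == ">[]</td>"

-- ===== PORT A =====
def build_table_from_html_and_cell (structure_ : List String) (content : Option (List String)) : List String :=
  let content_copy : List String :=
    match content with
    | none => List.replicate structure_.length "placeholder"
    | some c => c
  (structure_.foldl (fun (st : List String × List String) tag =>
      if pvCell tag then
        match st.1 with
        | [] => st                      -- `continue`
        | cell :: rest => (rest, st.2 ++ [PySem.Str.replace tag "[]" cell])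
      else (st.1, st.2 ++ [tag]))
    (content_copy, [])).2

-- ===== PORT B =====
def build_table_from_html_and_cell_alt (structure_ : List String) (content : Option (List String)) : List String :=
  let content_copy : List String :=
    match content with
    | none => List.replicate structure_.length "placeholder"
    | some c => c
  let positions : List Int :=
    (PySem.List.enumerate structure_).filterMap (fun p => if pvCell p.2 then some p.1 else none)
  let filled : PySem.Dict Int String := PySem.Dict.ofList (positions.zip content_copy)
  (PySem.List.enumerate structure_).flatMap (fun p =>
    if pvCell p.2 then
      match filled.get? p.1 with
      | some cell => [PySem.Str.replace p.2 "[]" cell]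
      | none => []
    else [p.2])

-- ===== PRECONDITION & SPEC =====
def Spec_build_table_from_html_and_cell (structure_ : List String) (content : Option (List String)) (out : List String) : Prop := out = build_table_from_html_and_cell_alt structure_ content
instance (structure_ : List String) (content : Option (List String)) (out : List String) : Decidable (Spec_build_table_from_html_and_cell structure_ content out) := by unfold Spec_build_table_from_html_and_cell; infer_instance

-- ===== CLAIM (what is proved, stated in full; the proofs are below) =====
def Claim_equal_build_table_from_html_and_cell : Prop := ∀ (structure_ : List String) (content : Option (List String)), Dom_build_table_from_html_and_cell structure_ content → Spec_build_table_from_html_and_cell structure_ content (build_table_from_html_and_cell structure_ content)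

-- ===== LEMMAS AND PROOFS =====

-- the cell positions of `s` when enumeration starts at `n` (proof-side name for B's index pass)
def pvPos (s : List String) (n : Int) : List Int :=
  (PySem.List.enumerate s n).filterMap (fun p => if pvCell p.2 then some p.1 else none)

-- B's fill pass over `s` enumerated from `n`, with fill table `d`
def pvFill (d : PySem.Dict Int String) (s : List String) (n : Int) : List String :=
  (PySem.List.enumerate s n).flatMap (fun p =>
    if pvCell p.2 then
      match d.get? p.1 with
      | some cell => [PySem.Str.replace p.2 "[]" cell]
      | none => []
    else [p.2])

lemma pvPos_cons (t : String) (ts : List String) (n : Int) :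
    pvPos (t :: ts) n = (if pvCell t then [n] else []) ++ pvPos ts (n + 1) := by
  simp only [pvPos, PySem.List.enumerate_cons, List.filterMap_cons]
  by_cases h : pvCell t <;> simp [h]

lemma pvPos_lb (s : List String) (n : Int) : ∀ i ∈ pvPos s n, n ≤ i := by
  induction s generalizing n with
  | nil => simp [pvPos]
  | cons t ts ih =>
    intro i hi
    rw [pvPos_cons] at hi
    rcases List.mem_append.1 hi with h | h
    · by_cases hc : pvCell t <;> simp [hc] at h; omega
    · have := ih (n + 1) i h; omega

lemma pvPos_pairwise (s : List String) (n : Int) : (pvPos s n).Pairwise (· < ·) := by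
  induction s generalizing n with
  | nil => simp [pvPos]
  | cons t ts ih =>
    rw [pvPos_cons]
    by_cases hc : pvCell t
    · simp only [hc, if_pos, List.singleton_append]
      exact List.pairwise_cons.2 ⟨fun i hi => by have := pvPos_lb ts (n + 1) i hi; omega, ih (n + 1)⟩
    · simpa [hc] using ih (n + 1)

lemma pvKeys_zip_sublist (l : List Int) (xs : List String) :
    ((l.zip xs).map Prod.fst).Sublist l := by
  induction l generalizing xs with
  | nil => simp
  | cons a l ih =>
    cases xs with
    | nil => simp
    | cons x xs => simpa using (ih xs).cons₂ a

lemma pvOfList_eq_mk (pairs : List (Int × String)) (h : (pairs.map Prod.fst).Nodup) :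
    PySem.Dict.ofList pairs = PySem.Dict.mk pairs := by
  apply PySem.Dict.ext
  have : (List.foldl (fun acc p => acc.insert p.1 p.2) (PySem.Dict.empty : PySem.Dict Int String) pairs).items
      = (PySem.Dict.empty : PySem.Dict Int String).items ++ List.map (fun a => (a.1, a.2)) pairs := by
    exact PySem.Dict.items_foldl_insert_fresh pairs Prod.fst Prod.snd _ (fun a _ => by simp [pysem]) h
  simpa [PySem.Dict.ofList, PySem.Dict.update, PySem.Dict.empty] using this

lemma pvLoopA_eq (s : List String) (cc : List String) (n : Int) (acc : List String) :
    (s.foldl (fun (st : List String × List String) tag =>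
      if pvCell tag then
        match st.1 with
        | [] => st
        | cell :: rest => (rest, st.2 ++ [PySem.Str.replace tag "[]" cell])
      else (st.1, st.2 ++ [tag]))
    (cc, acc)).2 = acc ++ pvFill (PySem.Dict.ofList ((pvPos s n).zip cc)) s n := by
  induction s generalizing cc n acc with
  | nil => simp [pvFill, PySem.List.enumerate]
  | cons t ts ih =>
    by_cases hc : pvCell t
    · cases cc with
      | nil =>
        -- content exhausted: zip is empty, dict is empty, the cell tag is skipped
        simp only [List.foldl_cons, hc, if_pos]
        rw [ih [] (n + 1) acc]
        simp [pvFill, PySem.List.enumerate_cons, hc, pysem, PySem.Dict.ofList, PySem.Dict.update]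
      | cons x xs =>
        simp only [List.foldl_cons, hc, if_pos]
        rw [ih xs (n + 1) (acc ++ [PySem.Str.replace t "[]" x])]
        have hpos : pvPos (t :: ts) n = n :: pvPos ts (n + 1) := by simp [pvPos_cons, hc]
        have hnodup : (((pvPos (t :: ts) n).zip (x :: xs)).map Prod.fst).Nodup := by
          have hpw : ((pvPos (t :: ts) n)).Pairwise (· < ·) := pvPos_pairwise _ _
          exact ((hpw.sublist (pvKeys_zip_sublist _ _)).imp (fun h => by omega)).nodup
        have hnodup' : (((pvPos ts (n + 1)).zip xs).map Prod.fst).Nodup := by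
          have hpw : ((pvPos ts (n + 1))).Pairwise (· < ·) := pvPos_pairwise _ _
          exact ((hpw.sublist (pvKeys_zip_sublist _ _)).imp (fun h => by omega)).nodup
        rw [hpos] at hnodup ⊢
        have hzip : ((n :: pvPos ts (n + 1)).zip (x :: xs)) = (n, x) :: (pvPos ts (n + 1)).zip xs := by
          simp
        rw [hzip] at hnodup ⊢
        rw [pvOfList_eq_mk _ hnodup, pvOfList_eq_mk _ (by simpa using hnodup')]
        -- now compare the fill passes
        unfold pvFill
        rw [PySem.List.enumerate_cons, List.flatMap_cons]
        have hhead : (PySem.Dict.mk ((n, x) :: (pvPos ts (n + 1)).zip xs)).get? n = some x := by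
          simp [PySem.Dict.get?_mk_cons]
        have htail : ∀ p ∈ PySem.List.enumerate ts (n + 1),
            (fun p => if pvCell p.2 then
                match (PySem.Dict.mk ((n, x) :: (pvPos ts (n + 1)).zip xs)).get? p.1 with
                | some cell => [PySem.Str.replace p.2 "[]" cell]
                | none => []
              else [p.2]) p
            = (fun p => if pvCell p.2 then
                match (PySem.Dict.mk ((pvPos ts (n + 1)).zip xs)).get? p.1 with
                | some cell => [PySem.Str.replace p.2 "[]" cell]
                | none => []
              else [p.2]) p := by
          intro p hp
          rcases (PySem.List.mem_enumerate_iff _ _ _).1 hp with ⟨k, hk, rfl⟩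
          have hne : ((n : Int) == n + 1 + (k : Int)) = false := by
            simp only [beq_eq_false_iff_ne]; omega
          simp only [PySem.Dict.get?_mk_cons, hne, Bool.false_eq_true, if_false]
        rw [List.flatMap_congr htail, hhead]
        simp [hc, List.append_assoc]
    · simp only [List.foldl_cons, hc, if_neg, Bool.false_eq_true, not_false_iff]
      rw [ih cc (n + 1) (acc ++ [t])]
      have hpos : pvPos (t :: ts) n = pvPos ts (n + 1) := by simp [pvPos_cons, hc]
      unfold pvFill
      rw [PySem.List.enumerate_cons, List.flatMap_cons, hpos]
      simp [hc, List.append_assoc]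

-- ===== VERDICT (by name: the statement is the Claim_ definition above) =====
theorem build_table_from_html_and_cell_spec : Claim_equal_build_table_from_html_and_cell := by
  intro structure_ content _
  unfold Spec_build_table_from_html_and_cell build_table_from_html_and_cell build_table_from_html_and_cell_alt
  cases content with
  | none => exact pvLoopA_eq structure_ _ 0 []
  | some c => exact pvLoopA_eq structure_ c 0 []
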